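-- pv_equiv track=rewrite | github.com/tamnd/sicp | scripts/split-texi.py | detect_heading_type
-- ===== SOURCE A (Python) =====
-- def detect_heading_type(lines, node_idx):
--     """Look for the heading type in the lines after @node."""
--     for i in range(node_idx + 1, min(node_idx + 6, len(lines))):
--         l = lines[i].strip()
--         for prefix, htype in [
--             ("@subsubsection", "subsubsection"),
--             ("@subsection", "subsection"),
--             ("@section", "section"),
--             ("@chapter", "chapter"),
--             ("@unnumbered", "unnumbered"),
--             ("@appendix", "appendix"),
--             ("@top", "top"),
--         ]:
--             if l.startswith(prefix + " ") or l == prefix: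
--                 return htype
--     return "unknown"
-- ===== SOURCE B (Python) =====
-- _TABLE = [
--     ("@subsubsection", "subsubsection"),
--     ("@subsection", "subsection"),
--     ("@section", "section"),
--     ("@chapter", "chapter"),
--     ("@unnumbered", "unnumbered"),
--     ("@appendix", "appendix"),
--     ("@top", "top"),
-- ]
--
--
-- def detect_heading_type(lines, node_idx):
--     """Look for the heading type in the lines after @node."""
--     window = [lines[i].strip()
--               for i in range(node_idx + 1, min(node_idx + 6, len(lines)))]
--     best = None
--     for prefix, htype in _TABLE:
--         for j, l in enumerate(window):
--             if l.startswith(prefix + " ") or l == prefix: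
--                 if best is None or j < best[0]:
--                     best = (j, htype)
--                 break
--     return best[1] if best else "unknown"
-- ===== Notes on version B (the rewrite author's own statement) =====
-- stated objective: alternative
-- what changed: B inverts the loop nesting: it materializes the stripped window once, then for each heading tag computes that tag's first match index within the window and returns the heading achieving the minimal index (ties impossible to matter since the first tag reaching the minimum wins), instead of A's per-line scan over the tag list.
import Mathlib
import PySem

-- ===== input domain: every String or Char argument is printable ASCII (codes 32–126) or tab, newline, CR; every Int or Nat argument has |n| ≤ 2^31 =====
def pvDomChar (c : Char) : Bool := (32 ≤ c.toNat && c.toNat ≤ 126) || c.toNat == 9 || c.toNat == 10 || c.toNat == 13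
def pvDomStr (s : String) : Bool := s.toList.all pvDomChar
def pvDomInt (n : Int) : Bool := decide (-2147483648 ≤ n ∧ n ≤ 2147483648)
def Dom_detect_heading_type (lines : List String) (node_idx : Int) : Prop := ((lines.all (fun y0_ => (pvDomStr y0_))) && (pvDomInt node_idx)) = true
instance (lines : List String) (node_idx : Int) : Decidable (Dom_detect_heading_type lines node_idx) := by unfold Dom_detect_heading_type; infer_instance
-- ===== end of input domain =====

-- B inverts the loop nesting: it materializes the stripped window once, then for each heading
-- tag finds that tag's first match index and returns the heading with the minimal index
-- (alternative decomposition; same return value everywhere A returns).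

-- ===== PORT A =====
-- the literal inner 'for prefix, htype in [...]' list of A
def pvTableA : List (String × String) :=
  [("@subsubsection", "subsubsection"),
   ("@subsection", "subsection"),
   ("@section", "section"),
   ("@chapter", "chapter"),
   ("@unnumbered", "unnumbered"),
   ("@appendix", "appendix"),
   ("@top", "top")]

-- A's inner loop: first pair whose 'l.startswith(prefix + " ") or l == prefix' fires
def pvInnerA (l : String) : List (String × String) → Option String
  | [] => none
  | (pfx, htype) :: rest =>
    if PySem.Str.startswith l (pfx ++ " ") || l == pfx then some htype
    else pvInnerA l rest

-- A's outer loop over the indices of range(node_idx+1, min(node_idx+6, len(lines)));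
-- lines[i] raising IndexError (pyGet? = none) is excluded by Pre_
def pvLoopA (lines : List String) : List Int → String
  | [] => "unknown"
  | i :: rest =>
    match PySem.List.pyGet? lines i with
    | none => "unknown"
    | some s =>
      match pvInnerA (PySem.Str.strip s) pvTableA with
      | some htype => htype
      | none => pvLoopA lines rest

def detect_heading_type (lines : List String) (node_idx : Int) : String :=
  pvLoopA lines (PySem.List.pyRange (node_idx + 1) (min (node_idx + 6) (lines.length : Int)) 1)

-- ===== PORT B =====
-- Source B's _TABLE constant
def pvTableB : List (String × String) :=
  [("@subsubsection", "subsubsection"),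
   ("@subsection", "subsection"),
   ("@section", "section"),
   ("@chapter", "chapter"),
   ("@unnumbered", "unnumbered"),
   ("@appendix", "appendix"),
   ("@top", "top")]

-- the window comprehension [lines[i].strip() for i in range(...)];
-- lines[i] raising IndexError (pyGet? = none) is excluded by Pre_
def pvWindow (lines : List String) : List Int → List String
  | [] => []
  | i :: rest =>
    match PySem.List.pyGet? lines i with
    | none => []
    | some s => PySem.Str.strip s :: pvWindow lines rest

-- Source B's per-line test 'l.startswith(prefix + " ") or l == prefix'
def pvCondB (l p : String) : Bool := PySem.Str.startswith l (p ++ " ") || l == p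

-- Source B's inner 'for j, l in enumerate(window): if …: break' — first match index of one tag
def pvFirstIdx (p : String) (j : Nat) : List String → Option Nat
  | [] => none
  | l :: rest => if pvCondB l p then some j else pvFirstIdx p (j + 1) rest

-- Source B's body of the outer 'for prefix, htype in _TABLE' loop updating 'best'
def pvStep (w : List String) (best : Option (Nat × String)) (e : String × String) :
    Option (Nat × String) :=
  match pvFirstIdx e.1 0 w with
  | none => best
  | some j =>
    match best with
    | none => some (j, e.2)
    | some b => if j < b.1 then some (j, e.2) else best

def detect_heading_type_alt (lines : List String) (node_idx : Int) : String :=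
  let w := pvWindow lines (PySem.List.pyRange (node_idx + 1) (min (node_idx + 6) (lines.length : Int)) 1)
  match pvTableB.foldl (pvStep w) none with
  | some b => b.2
  | none => "unknown"

-- ===== PRECONDITION & SPEC =====
-- A raises IndexError iff the range is nonempty and its first index node_idx+1 is below
-- -len(lines); Pre_ excludes exactly those inputs (the range's indices increase and are < len).
def Pre_detect_heading_type (lines : List String) (node_idx : Int) : Prop :=
  -(lines.length : Int) ≤ node_idx + 1 ∨ min (node_idx + 6) (lines.length : Int) ≤ node_idx + 1

instance (lines : List String) (node_idx : Int) : Decidable (Pre_detect_heading_type lines node_idx) := by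
  unfold Pre_detect_heading_type; infer_instance

def pvWitness_detect_heading_type : List String × Int := (["@node Foo", "@section Foo"], 0)

def Spec_detect_heading_type (lines : List String) (node_idx : Int) (out : String) : Prop := out = detect_heading_type_alt lines node_idx
instance (lines : List String) (node_idx : Int) (out : String) : Decidable (Spec_detect_heading_type lines node_idx out) := by unfold Spec_detect_heading_type; infer_instance

-- ===== CLAIM =====
def Claim_equal_detect_heading_type : Prop := ∀ (lines : List String) (node_idx : Int), Dom_detect_heading_type lines node_idx → Pre_detect_heading_type lines node_idx → Spec_detect_heading_type lines node_idx (detect_heading_type lines node_idx)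

-- ===== LEMMAS AND PROOFS =====

-- the shift map on 'best' entries (window grows by one line at the front)
def pvShift (b : Option (Nat × String)) : Option (Nat × String) :=
  b.map (fun p => (p.1 + 1, p.2))

-- A's loop, re-expressed as a scan of the stripped window
def pvDefA : List String → String
  | [] => "unknown"
  | l :: rest =>
    match pvInnerA l pvTableA with
    | some htype => htype
    | none => pvDefA rest

lemma pvLoopA_window (lines : List String) : ∀ (idxs : List Int),
    pvLoopA lines idxs = pvDefA (pvWindow lines idxs) := by
  intro idxs
  induction idxs with
  | nil => rfl
  | cons i rest ih =>
    simp only [pvLoopA, pvWindow]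
    cases PySem.List.pyGet? lines i with
    | none => rfl
    | some s =>
      simp only [pvDefA]
      cases pvInnerA (PySem.Str.strip s) pvTableA with
      | none => simpa using ih
      | some h => rfl

lemma pvFirstIdx_shift (p : String) : ∀ (w : List String) (j : Nat),
    pvFirstIdx p (j + 1) w = (pvFirstIdx p j w).map (· + 1) := by
  intro w
  induction w with
  | nil => intro j; rfl
  | cons l rest ih =>
    intro j
    simp only [pvFirstIdx]
    by_cases hc : pvCondB l p
    · simp [hc]
    · simp only [hc, if_false, Bool.false_eq_true]
      exact ih (j + 1)

-- empty window: the fold never changes best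
lemma pvFold_nil : ∀ (T : List (String × String)) (b : Option (Nat × String)),
    List.foldl (pvStep []) b T = b := by
  intro T
  induction T with
  | nil => intro b; rfl
  | cons e T' ih =>
    intro b
    simp only [List.foldl_cons]
    have : pvStep [] b e = b := rfl
    rw [this, ih]

-- once best has index 0, the fold keeps it
lemma pvFold_keep_zero : ∀ (T : List (String × String)) (w : List String) (h : String),
    List.foldl (pvStep w) (some (0, h)) T = some (0, h) := by
  intro T
  induction T with
  | nil => intro w h; rfl
  | cons e T' ih =>
    intro w h
    simp only [List.foldl_cons]
    have hs : pvStep w (some (0, h)) e = some (0, h) := by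
      unfold pvStep
      cases pvFirstIdx e.1 0 w with
      | none => rfl
      | some j => simp
    rw [hs, ih]

-- a line matching no tag of T: growing the window by it just shifts every index
lemma pvFold_shift (l : String) (w : List String) : ∀ (T : List (String × String)),
    (∀ e ∈ T, pvCondB l e.1 = false) → ∀ (b : Option (Nat × String)),
    List.foldl (pvStep (l :: w)) (pvShift b) T = pvShift (List.foldl (pvStep w) b T) := by
  intro T
  induction T with
  | nil => intro _ b; rfl
  | cons e T' ih =>
    intro hno b
    have hc : pvCondB l e.1 = false := hno e (by simp)
    have hrest : ∀ e' ∈ T', pvCondB l e'.1 = false := fun e' he' => hno e' (by simp [he'])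
    simp only [List.foldl_cons]
    have hfi : pvFirstIdx e.1 0 (l :: w) = (pvFirstIdx e.1 0 w).map (· + 1) := by
      simp only [pvFirstIdx, hc, if_false, Bool.false_eq_true]
      exact pvFirstIdx_shift e.1 w 0
    have hstep : pvStep (l :: w) (pvShift b) e = pvShift (pvStep w b e) := by
      unfold pvStep
      rw [hfi]
      cases pvFirstIdx e.1 0 w with
      | none => rfl
      | some j =>
        cases b with
        | none => rfl
        | some p =>
          simp only [Option.map_some, pvShift, Option.map_some]
          by_cases hlt : j < p.1
          · rw [if_pos hlt, if_pos (by omega)]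
            rfl
          · rw [if_neg hlt, if_neg (by omega)]
            rfl
    rw [hstep, ih hrest]

-- a line matched by A's inner scan with result h: the fold returns (0, h),
-- provided best so far is none or has a positive index
lemma pvFold_match (l : String) (w : List String) : ∀ (T : List (String × String)) (h : String),
    pvInnerA l T = some h → ∀ (b : Option (Nat × String)),
    (b = none ∨ ∃ k h', b = some (k + 1, h')) →
    List.foldl (pvStep (l :: w)) b T = some (0, h) := by
  intro T
  induction T with
  | nil => intro h hinner; simp [pvInnerA] at hinner
  | cons e T' ih =>
    intro h hinner b hb
    obtain ⟨pfx, htype⟩ := e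
    simp only [List.foldl_cons]
    by_cases hc : (PySem.Str.startswith l (pfx ++ " ") || l == pfx) = true
    · have hcB : pvCondB l pfx = true := hc
      have hh : htype = h := by
        simp only [pvInnerA, hc, if_true] at hinner
        exact Option.some.inj hinner
      have hfi : pvFirstIdx pfx 0 (l :: w) = some 0 := by
        simp [pvFirstIdx, hcB]
      have hstep : pvStep (l :: w) b ((pfx, htype) : String × String) = some (0, h) := by
        unfold pvStep
        simp only [hfi]
        rcases hb with rfl | ⟨k, h', rfl⟩
        · simp [hh]
        · simp [hh]
      rw [hstep, pvFold_keep_zero]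
    · have hcB : pvCondB l pfx = false := by
        unfold pvCondB; exact Bool.eq_false_iff.mpr hc
      have hinner' : pvInnerA l T' = some h := by
        simpa only [pvInnerA, hc, if_false, Bool.false_eq_true] using hinner
      have hfi : pvFirstIdx pfx 0 (l :: w) = (pvFirstIdx pfx 0 w).map (· + 1) := by
        simp only [pvFirstIdx, hcB, if_false, Bool.false_eq_true]
        exact pvFirstIdx_shift pfx w 0
      have hb' : pvStep (l :: w) b ((pfx, htype) : String × String) = none ∨
          ∃ k h', pvStep (l :: w) b ((pfx, htype) : String × String) = some (k + 1, h') := by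
        unfold pvStep
        rw [hfi]
        cases hw : pvFirstIdx pfx 0 w with
        | none => exact hb
        | some j =>
          rcases hb with rfl | ⟨k, h', rfl⟩
          · exact Or.inr ⟨j, htype, rfl⟩
          · simp only [Option.map_some]
            by_cases hlt : j + 1 < k + 1
            · rw [if_pos hlt]; exact Or.inr ⟨j, htype, rfl⟩
            · rw [if_neg hlt]; exact Or.inr ⟨k, h', rfl⟩
      exact ih h hinner' _ hb'

-- no tag of T matches l iff A's inner scan over T returns none
lemma pvInner_none (l : String) : ∀ (T : List (String × String)),
    pvInnerA l T = none → ∀ e ∈ T, pvCondB l e.1 = false := by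
  intro T
  induction T with
  | nil => intro _ e he; simp at he
  | cons e T' ih =>
    intro hnone e' he'
    obtain ⟨pfx, htype⟩ := e
    by_cases hc : (PySem.Str.startswith l (pfx ++ " ") || l == pfx) = true
    · simp only [pvInnerA, hc, if_true] at hnone
      exact (Option.some_ne_none _ hnone).elim
    · have hnone' : pvInnerA l T' = none := by
        simpa only [pvInnerA, hc, if_false, Bool.false_eq_true] using hnone
      rcases List.mem_cons.mp he' with rfl | hmem
      · unfold pvCondB; exact Bool.eq_false_iff.mpr hc
      · exact ih hnone' e' hmem

-- the central lemma: A's window scan equals B's per-tag minimal-index fold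
lemma pvMain : ∀ (w : List String),
    pvDefA w = (match List.foldl (pvStep w) none pvTableB with
                | some b => b.2
                | none => "unknown") := by
  intro w
  induction w with
  | nil => rw [pvFold_nil]; rfl
  | cons l rest ih =>
    have hTB : pvTableB = pvTableA := rfl
    cases hm : pvInnerA l pvTableA with
    | some h =>
      have hfold : List.foldl (pvStep (l :: rest)) none pvTableB = some (0, h) :=
        pvFold_match l rest pvTableB h (hTB ▸ hm) none (Or.inl rfl)
      simp only [pvDefA, hm, hfold]
    | none =>
      have hno : ∀ e ∈ pvTableB, pvCondB l e.1 = false :=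
        pvInner_none l pvTableB (hTB ▸ hm)
      have hshift := pvFold_shift l rest pvTableB hno none
      have hnone : pvShift (none : Option (Nat × String)) = none := rfl
      rw [hnone] at hshift
      simp only [pvDefA, hm, hshift]
      cases hF : List.foldl (pvStep rest) none pvTableB with
      | none => rw [hF] at ih; simpa [pvShift] using ih
      | some b => rw [hF] at ih; simpa [pvShift] using ih

-- ===== VERDICT =====
theorem detect_heading_type_spec : Claim_equal_detect_heading_type := by
  intro lines node_idx _ _
  unfold Spec_detect_heading_type detect_heading_type detect_heading_type_alt
  rw [pvLoopA_window]
  exact pvMain _
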